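-- pv_equiv track=rewrite | github.com/Ilyass-Dahaoui/ZeroJam-The-Serious-Game-to-Beat-Traffic-Jams | CodeGame/main.py | calc_max_speed
-- ===== SOURCE A (Python) =====
-- speed_limit_panels={
--     10: 20,
--     120: 30,
--     230: 10,
--     360: 40,
--     500: 10,
--     600: 30,
--     850: 40,
--     1000: 50,
--     1200: 30,
--     1400: 60
-- }
--
-- speed_limit_panels_positions= sorted(speed_limit_panels.keys(), reverse= True)
--
-- def calc_max_speed(player_position):
--     player_position+= 12
--     max_speed = 20
--     for pos in speed_limit_panels_positions:
--         if player_position > pos: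
--             max_speed= speed_limit_panels[pos]
--             break
--     return max_speed
-- ===== SOURCE B (Python) =====
-- speed_limit_panels={
--     10: 20,
--     120: 30,
--     230: 10,
--     360: 40,
--     500: 10,
--     600: 30,
--     850: 40,
--     1000: 50,
--     1200: 30,
--     1400: 60
-- }
--
-- _positions = sorted(speed_limit_panels)
--
-- def calc_max_speed(player_position):
--     x = player_position + 12
--     lo, hi = 0, len(_positions)
--     while lo < hi:          # bisect_left: first index with _positions[i] >= x
--         mid = (lo + hi) // 2
--         if _positions[mid] < x:
--             lo = mid + 1
--         else:
--             hi = mid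
--     return speed_limit_panels[_positions[lo - 1]] if lo > 0 else 20
-- ===== Notes on version B (the rewrite author's own statement) =====
-- stated objective: idiomatic
-- what changed: Replaces the descending linear scan with break by a bisect_left binary search over the ascending panel positions, then a single table lookup at the index left of the insertion point.
import Mathlib
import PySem

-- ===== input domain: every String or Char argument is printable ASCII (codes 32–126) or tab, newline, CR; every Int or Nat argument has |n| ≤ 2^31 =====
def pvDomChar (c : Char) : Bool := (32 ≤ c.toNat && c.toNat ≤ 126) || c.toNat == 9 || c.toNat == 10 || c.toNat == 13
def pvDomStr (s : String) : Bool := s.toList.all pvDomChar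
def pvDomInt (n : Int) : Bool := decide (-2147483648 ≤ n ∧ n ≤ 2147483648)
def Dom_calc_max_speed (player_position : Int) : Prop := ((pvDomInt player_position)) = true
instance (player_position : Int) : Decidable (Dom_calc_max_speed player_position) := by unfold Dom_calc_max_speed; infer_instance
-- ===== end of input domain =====

-- B replaces A's descending linear scan + break with a bisect_left binary search on the
-- ascending panel positions (objective: idiomatic/alternative; same tiny constant table).

-- ===== PORT A =====
-- the module-level dict of panels, in insertion order
def speedLimitPanels : PySem.Dict Int Int :=
  PySem.Dict.ofList [(10, 20), (120, 30), (230, 10), (360, 40), (500, 10),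
   (600, 30), (850, 40), (1000, 50), (1200, 30), (1400, 60)]

-- sorted(speed_limit_panels.keys(), reverse=True)
def speedLimitPanelsPositions : List Int :=
  [1400, 1200, 1000, 850, 600, 500, 360, 230, 120, 10]

-- the for-loop with break: first pos with player_position > pos wins, else max_speed stays 20
def calcLoopA (pp : Int) : List Int → Int
  | [] => 20
  | pos :: rest => if pp > pos then (speedLimitPanels.getD pos 0) else calcLoopA pp rest

def calc_max_speed (player_position : Int) : Int :=
  calcLoopA (player_position + 12) speedLimitPanelsPositions

-- ===== PORT B =====
-- sorted(speed_limit_panels) ascending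
def posAsc : List Int := [10, 120, 230, 360, 500, 600, 850, 1000, 1200, 1400]

-- hand-written bisect_left loop from Source B; fuel = list length bounds the iterations (totality guard only)
def bisectLeftB (xs : List Int) (x : Int) : Nat → Nat → Nat → Nat
  | 0, lo, _ => lo
  | fuel + 1, lo, hi =>
    if lo < hi then
      let mid := (lo + hi) / 2
      if ((PySem.List.pyGet? xs (Int.ofNat mid)).getD 0) < x then
        bisectLeftB xs x fuel (mid + 1) hi
      else
        bisectLeftB xs x fuel lo mid
    else lo

def calc_max_speed_alt (player_position : Int) : Int :=
  let x := player_position + 12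
  let lo := bisectLeftB posAsc x posAsc.length 0 posAsc.length
  if lo > 0 then
    speedLimitPanels.getD ((PySem.List.pyGet? posAsc (Int.ofNat (lo - 1))).getD 0) 0
  else 20

-- ===== PRECONDITION & SPEC =====
def Spec_calc_max_speed (player_position : Int) (out : Int) : Prop := out = calc_max_speed_alt player_position
instance (player_position : Int) (out : Int) : Decidable (Spec_calc_max_speed player_position out) := by unfold Spec_calc_max_speed; infer_instance

-- ===== CLAIM (what is proved, stated in full; the proofs are below) =====
def Claim_equal_calc_max_speed : Prop := ∀ (player_position : Int), Dom_calc_max_speed player_position → Spec_calc_max_speed player_position (calc_max_speed player_position)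

-- ===== LEMMAS AND PROOFS =====

-- ===== VERDICT (by name: the statement is the Claim_ definition above) =====
-- the common piecewise value: speed limit as a function of x = player_position + 12
def pwSpeed (x : Int) : Int :=
  if 1400 < x then 60 else if 1200 < x then 30 else if 1000 < x then 50 else
  if 850 < x then 40 else if 600 < x then 30 else if 500 < x then 10 else
  if 360 < x then 40 else if 230 < x then 10 else if 120 < x then 30 else
  if 10 < x then 20 else 20

theorem loopA_eq_pw (x : Int) : calcLoopA x speedLimitPanelsPositions = pwSpeed x := by
  simp only [speedLimitPanelsPositions, calcLoopA, pwSpeed,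
    show speedLimitPanels.getD 1400 0 = 60 from rfl,
    show speedLimitPanels.getD 1200 0 = 30 from rfl,
    show speedLimitPanels.getD 1000 0 = 50 from rfl,
    show speedLimitPanels.getD 850 0 = 40 from rfl,
    show speedLimitPanels.getD 600 0 = 30 from rfl,
    show speedLimitPanels.getD 500 0 = 10 from rfl,
    show speedLimitPanels.getD 360 0 = 40 from rfl,
    show speedLimitPanels.getD 230 0 = 10 from rfl,
    show speedLimitPanels.getD 120 0 = 30 from rfl,
    show speedLimitPanels.getD 10 0 = 20 from rfl]

-- the insertion point computed by the binary search, as an explicit case split on x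
theorem bisect_eq (x : Int) : bisectLeftB posAsc x 10 0 10 =
    (if 1400 < x then 10 else if 1200 < x then 9 else if 1000 < x then 8 else
     if 850 < x then 7 else if 600 < x then 6 else if 500 < x then 5 else
     if 360 < x then 4 else if 230 < x then 3 else if 120 < x then 2 else
     if 10 < x then 1 else 0) := by
  simp only [bisectLeftB, Nat.reduceAdd, Nat.reduceDiv, Nat.reduceLT, reduceIte,
    show ((PySem.List.pyGet? posAsc (Int.ofNat 0)).getD 0) = 10 from rfl,
    show ((PySem.List.pyGet? posAsc (Int.ofNat 1)).getD 0) = 120 from rfl,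
    show ((PySem.List.pyGet? posAsc (Int.ofNat 2)).getD 0) = 230 from rfl,
    show ((PySem.List.pyGet? posAsc (Int.ofNat 3)).getD 0) = 360 from rfl,
    show ((PySem.List.pyGet? posAsc (Int.ofNat 4)).getD 0) = 500 from rfl,
    show ((PySem.List.pyGet? posAsc (Int.ofNat 5)).getD 0) = 600 from rfl,
    show ((PySem.List.pyGet? posAsc (Int.ofNat 6)).getD 0) = 850 from rfl,
    show ((PySem.List.pyGet? posAsc (Int.ofNat 7)).getD 0) = 1000 from rfl,
    show ((PySem.List.pyGet? posAsc (Int.ofNat 8)).getD 0) = 1200 from rfl,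
    show ((PySem.List.pyGet? posAsc (Int.ofNat 9)).getD 0) = 1400 from rfl]
  split_ifs <;> omega

set_option maxHeartbeats 1600000 in
theorem alt_eq_pw (p : Int) : calc_max_speed_alt p = pwSpeed (p + 12) := by
  simp only [calc_max_speed_alt, show posAsc.length = 10 from rfl, bisect_eq]
  split_ifs with h1 h2 h3 h4 h5 h6 h7 h8 h9 h10 <;>
    simp only [pwSpeed, h1] <;> split_ifs <;> first | decide | (exfalso; omega)

-- ===== VERDICT (by name: the statement is the Claim_ definition above) =====
theorem calc_max_speed_spec : Claim_equal_calc_max_speed := by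
  intro p _
  unfold Spec_calc_max_speed calc_max_speed
  rw [loopA_eq_pw, alt_eq_pw]
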